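-- pv_equiv track=rewrite | github.com/ruksol/reAVS | core/util/smali_like.py | find_method_calls
-- ===== SOURCE A (Python) =====
-- from typing import List, Tuple
--
-- def find_method_calls(invoked: List[str], fragments: List[str]) -> List[str]:
--     matches: List[str] = []
--     for call in invoked:
--         for frag in fragments:
--             if frag in call:
--                 matches.append(call)
--                 break
--     return matches
-- ===== SOURCE B (Python) =====
-- def find_method_calls(invoked, fragments):
--     # Sieve: repeatedly filter a worklist of (index, call) pairs by 'fragment not in call';
--     # the survivors are exactly the never-matched calls, the answer is their complement.
--     pending = list(enumerate(invoked))
--     for frag in fragments: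
--         pending = [p for p in pending if frag not in p[1]]
--     unmatched = {i for i, _ in pending}
--     return [call for i, call in enumerate(invoked) if i not in unmatched]
-- ===== Notes on version B (the rewrite author's own statement) =====
-- stated objective: alternative
-- what changed: Loop nesting is transposed into a sieve: B filters a worklist of (index, call) pairs by one fragment at a time (a matched call leaves the worklist and is never tested against later fragments), and the answer is the complement of the surviving unmatched indices, instead of A's per-call inner scan with break.
import Mathlib
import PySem

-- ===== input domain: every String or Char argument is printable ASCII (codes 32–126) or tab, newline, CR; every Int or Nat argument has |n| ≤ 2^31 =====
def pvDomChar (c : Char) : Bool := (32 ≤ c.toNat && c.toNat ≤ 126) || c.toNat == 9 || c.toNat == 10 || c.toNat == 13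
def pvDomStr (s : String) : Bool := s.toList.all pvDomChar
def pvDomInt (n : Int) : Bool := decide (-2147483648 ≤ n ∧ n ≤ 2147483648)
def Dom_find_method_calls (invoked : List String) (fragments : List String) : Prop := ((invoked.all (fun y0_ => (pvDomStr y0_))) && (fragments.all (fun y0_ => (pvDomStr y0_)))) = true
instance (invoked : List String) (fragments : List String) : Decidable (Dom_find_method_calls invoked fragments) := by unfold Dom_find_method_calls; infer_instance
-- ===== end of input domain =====

-- B transposes the loops into a sieve: a worklist of (index, call) pairs is filtered by one
-- fragment at a time, and the answer is the complement of the surviving unmatched indices;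
-- same result as A's per-call scan-with-break, alternative structure.

-- ===== PORT A =====
-- inner 'for frag in fragments: if frag in call: append; break' — returns whether the break fired
def pvAScan (call : String) : List String → Bool
  | [] => false
  | frag :: rest => if PySem.Str.isIn frag call then true else pvAScan call rest

def find_method_calls (invoked : List String) (fragments : List String) : List String :=
  invoked.foldl (fun acc call =>
    if pvAScan call fragments then acc ++ [call] else acc) []

-- ===== PORT B =====
def find_method_calls_alt (invoked : List String) (fragments : List String) : List String :=
  let pending := fragments.foldl
    (fun pending frag => pending.filter (fun p => !PySem.Str.isIn frag p.2))
    (PySem.List.enumerate invoked)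
  let unmatched := PySem.Set.ofList (pending.map (fun p => p.1))
  ((PySem.List.enumerate invoked).filter (fun p => !PySem.Set.contains unmatched p.1)).map (fun p => p.2)

-- ===== PRECONDITION & SPEC =====
def Spec_find_method_calls (invoked : List String) (fragments : List String) (out : List String) : Prop := out = find_method_calls_alt invoked fragments
instance (invoked : List String) (fragments : List String) (out : List String) : Decidable (Spec_find_method_calls invoked fragments out) := by unfold Spec_find_method_calls; infer_instance

-- ===== CLAIM (what is proved, stated in full; the proofs are below) =====
def Claim_equal_find_method_calls : Prop := ∀ (invoked : List String) (fragments : List String), Dom_find_method_calls invoked fragments → Spec_find_method_calls invoked fragments (find_method_calls invoked fragments)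

-- ===== LEMMAS AND PROOFS =====

-- A's inner break-loop is an 'any' over the fragments
theorem pvAScan_eq_any (call : String) (F : List String) :
    pvAScan call F = F.any (fun frag => PySem.Str.isIn frag call) := by
  induction F with
  | nil => rfl
  | cons f rest ih => simp [pvAScan, ih]

-- the fragments-fold of filters is one filter by 'no fragment matches'
theorem pvSieve_fold (F : List String) (l : List (Int × String)) :
    F.foldl (fun pending frag => pending.filter (fun p => !PySem.Str.isIn frag p.2)) l
      = l.filter (fun p => F.all (fun f => !PySem.Str.isIn f p.2)) := by
  induction F generalizing l with
  | nil => simp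
  | cons f rest ih =>
    rw [List.foldl_cons, ih, List.filter_filter]
    congr 1
    funext a
    simp [Bool.and_comm]

-- Bool: 'not (no fragment matches)' is 'some fragment matches'
theorem pvNotAllNot (F : List String) (c : String) :
    (!(F.all (fun f => !PySem.Str.isIn f c))) = F.any (fun f => PySem.Str.isIn f c) := by
  induction F with
  | nil => rfl
  | cons f rest ih => simp only [List.all_cons, List.any_cons, Bool.not_and, Bool.not_not, ih]

-- an index of 'enumerate invoked' survives the sieve iff its own pair does
theorem pvMem_fst_filter_enumerate (invoked : List String) (q : Int × String → Bool)
    (p : Int × String) (hp : p ∈ PySem.List.enumerate invoked) :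
    p.1 ∈ (((PySem.List.enumerate invoked).filter q).map (fun p => p.1)) ↔ q p = true := by
  constructor
  · intro h
    rcases List.mem_map.mp h with ⟨p', hp', hfst⟩
    rcases List.mem_filter.mp hp' with ⟨hp'mem, hq'⟩
    rcases (PySem.List.mem_enumerate_iff _ _ _).mp hp with ⟨k, hk, rfl⟩
    rcases (PySem.List.mem_enumerate_iff _ _ _).mp hp'mem with ⟨k', hk', rfl⟩
    simp only at hfst
    have : k' = k := by omega
    subst this
    exact hq'
  · intro hq
    exact List.mem_map.mpr ⟨p, List.mem_filter.mpr ⟨hp, hq⟩, rfl⟩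

-- ===== VERDICT (by name: the statement is the Claim_ definition above) =====
theorem find_method_calls_spec : Claim_equal_find_method_calls := by
  intro invoked fragments _
  unfold Spec_find_method_calls find_method_calls find_method_calls_alt
  dsimp only
  rw [pvSieve_fold]
  have hA := PySem.List.foldl_append_if_eq_filter (l := invoked)
    (p := fun call => pvAScan call fragments) (acc := [])
  rw [hA, List.nil_append]
  have hcond : ∀ p ∈ PySem.List.enumerate invoked,
      (!PySem.Set.contains (PySem.Set.ofList ((((PySem.List.enumerate invoked).filter
          (fun p => fragments.all (fun f => !PySem.Str.isIn f p.2))).map (fun p => p.1)))) p.1)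
        = fragments.any (fun f => PySem.Str.isIn f p.2) := by
    intro p hp
    rw [← pvNotAllNot fragments p.2]
    congr 1
    have hL : (PySem.Set.contains (PySem.Set.ofList ((((PySem.List.enumerate invoked).filter
          (fun p => fragments.all (fun f => !PySem.Str.isIn f p.2))).map (fun p => p.1)))) p.1 = true)
        ↔ (fragments.all (fun f => !PySem.Str.isIn f p.2)) = true :=
      ((PySem.Set.contains_iff _ _).trans (PySem.Set.mem_ofList _ _)).trans
        (pvMem_fst_filter_enumerate invoked
          (fun p => fragments.all (fun f => !PySem.Str.isIn f p.2)) p hp)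
    by_cases hq : (fragments.all (fun f => !PySem.Str.isIn f p.2)) = true
    · rw [hq]; exact hL.mpr hq
    · rw [Bool.eq_false_iff.mpr hq]
      exact Bool.eq_false_iff.mpr (fun hh => hq (hL.mp hh))
  rw [List.filter_congr hcond]
  have hfm : ((PySem.List.enumerate invoked).filter
        (fun p => fragments.any (fun f => PySem.Str.isIn f p.2))).map (fun p => p.2)
      = ((PySem.List.enumerate invoked).map (fun p => p.2)).filter
        (fun c => fragments.any (fun f => PySem.Str.isIn f c)) := by
    rw [List.filter_map]; rfl
  rw [hfm, PySem.List.map_snd_enumerate]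
  apply List.filter_congr
  intro c _
  rw [pvAScan_eq_any]
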